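-- pv_equiv track=rewrite | github.com/brenbrenbrenbren/volcano-tool | plotting/upset.py | get_intersection_genes
-- ===== SOURCE A (Python) =====
-- from typing import Dict, Set, List, Tuple, Optional
--
-- def get_intersection_genes(
--     deg_sets: Dict[str, Set[str]],
--     selected_datasets: List[str],
--     exclusive: bool = True
-- ) -> Set[str]:
--     """
--     Get genes in the intersection of selected datasets.
--
--     Args:
--         deg_sets: Dictionary of dataset name to gene set
--         selected_datasets: List of datasets to intersect
--         exclusive: If True, return only genes in exactly these datasets
--
--     Returns:
--         Set of gene names
--     """
--     if not selected_datasets: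
--         return set()
--
--     # Genes in all selected datasets
--     intersection = set.intersection(*[deg_sets[name] for name in selected_datasets])
--
--     if exclusive:
--         # Remove genes that are also in other datasets
--         other_datasets = [name for name in deg_sets if name not in selected_datasets]
--         for name in other_datasets:
--             intersection -= deg_sets[name]
--
--     return intersection
-- ===== SOURCE B (Python) =====
-- def get_intersection_genes(deg_sets, selected_datasets, exclusive=True):
--     if not selected_datasets:
--         return set()
--     first = deg_sets[selected_datasets[0]]
--     sel = set(selected_datasets)
--     if exclusive:
--         return {g for g in first
--                 if all((name in sel) == (g in genes)
--                        for name, genes in deg_sets.items())}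
--     return {g for g in first
--             if all(g in genes
--                    for name, genes in deg_sets.items() if name in sel)}
-- ===== Notes on version B (the rewrite author's own statement) =====
-- stated objective: alternative
-- what changed: A intersects the selected gene sets with set.intersection and then subtracts every non-selected set; B never builds intermediate sets: it filters the first selected gene set with one per-gene membership test over deg_sets.items() (exclusive: selection status of each dataset must equal the gene's membership; inclusive: every selected dataset must contain the gene).
import Mathlib
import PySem

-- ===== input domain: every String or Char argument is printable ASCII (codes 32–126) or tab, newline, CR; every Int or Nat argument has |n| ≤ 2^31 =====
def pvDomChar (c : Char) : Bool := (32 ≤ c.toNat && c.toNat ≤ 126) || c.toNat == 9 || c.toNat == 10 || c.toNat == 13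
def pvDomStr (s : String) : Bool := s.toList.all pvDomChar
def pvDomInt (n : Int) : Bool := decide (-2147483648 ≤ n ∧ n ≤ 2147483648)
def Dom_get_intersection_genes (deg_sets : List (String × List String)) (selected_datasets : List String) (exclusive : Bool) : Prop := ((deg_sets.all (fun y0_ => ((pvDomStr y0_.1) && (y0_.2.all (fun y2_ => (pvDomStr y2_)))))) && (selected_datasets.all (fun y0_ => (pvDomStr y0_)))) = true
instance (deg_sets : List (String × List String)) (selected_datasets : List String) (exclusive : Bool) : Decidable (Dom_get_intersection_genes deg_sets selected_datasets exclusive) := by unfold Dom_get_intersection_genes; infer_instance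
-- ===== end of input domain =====

-- B replaces A's set algebra (intersect the selected sets, then subtract every other set)
-- by a single per-gene membership test over the first selected set; alternative decomposition,
-- equal value (return value only; neither version mutates its arguments).

-- ===== PORT A =====
def get_intersection_genes (deg_sets : List (String × List String)) (selected_datasets : List String) (exclusive : Bool) : List String :=
  if selected_datasets.isEmpty then []
  else
    let d := PySem.Dict.mk deg_sets
    -- intersection = set.intersection(*[deg_sets[name] for name in selected_datasets])
    let sets := selected_datasets.map (fun name => d.getD name [])
    let inter :=
      match sets with
      | [] => []
      | s :: rest => rest.foldl (fun acc t => PySem.Set.inter acc t) (PySem.Set.ofList s)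
    if exclusive then
      let others := d.keys.filter (fun name => !selected_datasets.contains name)
      others.foldl (fun acc name => PySem.Set.diff acc (d.getD name [])) inter
    else inter

-- ===== PORT B =====
def get_intersection_genes_alt (deg_sets : List (String × List String)) (selected_datasets : List String) (exclusive : Bool) : List String :=
  if selected_datasets.isEmpty then []
  else
    let d := PySem.Dict.mk deg_sets
    let first := PySem.Set.ofList (d.getD (selected_datasets.headD "") [])
    let sel := PySem.Set.ofList selected_datasets
    if exclusive then
      first.filter (fun g => deg_sets.all (fun p => PySem.Set.contains sel p.1 == p.2.contains g))
    else
      first.filter (fun g => deg_sets.all (fun p => !PySem.Set.contains sel p.1 || p.2.contains g))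

-- ===== PRECONDITION & SPEC =====
-- Pre_ excludes (a) selected names missing from deg_sets, where A raises KeyError, and
-- (b) association lists with duplicate keys, which do not represent a Python dict (both
-- Pythons receive the collapsed dict there, but the list-level ports may disagree).
def Pre_get_intersection_genes (deg_sets : List (String × List String)) (selected_datasets : List String) (exclusive : Bool) : Prop :=
  (deg_sets.map Prod.fst).Nodup ∧ ∀ n ∈ selected_datasets, n ∈ deg_sets.map Prod.fst
instance (deg_sets : List (String × List String)) (selected_datasets : List String) (exclusive : Bool) : Decidable (Pre_get_intersection_genes deg_sets selected_datasets exclusive) := by unfold Pre_get_intersection_genes; infer_instance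
def pvWitness_get_intersection_genes : (List (String × List String)) × List String × Bool :=
  ([("a", ["g1", "g2"]), ("b", ["g2"])], ["a"], true)
def Spec_get_intersection_genes (deg_sets : List (String × List String)) (selected_datasets : List String) (exclusive : Bool) (out : List String) : Prop := out = get_intersection_genes_alt deg_sets selected_datasets exclusive
instance (deg_sets : List (String × List String)) (selected_datasets : List String) (exclusive : Bool) (out : List String) : Decidable (Spec_get_intersection_genes deg_sets selected_datasets exclusive out) := by unfold Spec_get_intersection_genes; infer_instance

-- ===== CLAIM (what is proved, stated in full; the proofs are below) =====
def Claim_equal_get_intersection_genes : Prop := ∀ (deg_sets : List (String × List String)) (selected_datasets : List String) (exclusive : Bool), Dom_get_intersection_genes deg_sets selected_datasets exclusive → Pre_get_intersection_genes deg_sets selected_datasets exclusive → Spec_get_intersection_genes deg_sets selected_datasets exclusive (get_intersection_genes deg_sets selected_datasets exclusive)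

-- ===== LEMMAS AND PROOFS =====

-- a fold of filters is one filter by the conjunction
theorem pv_foldl_filter {α β : Type} (f : β → α → Bool) :
    ∀ (l : List β) (s : List α),
      l.foldl (fun acc b => acc.filter (fun x => f b x)) s
        = s.filter (fun x => l.all (fun b => f b x)) := by
  intro l
  induction l with
  | nil => intro s; simp
  | cons b l ih =>
    intro s
    rw [List.foldl_cons, ih, List.filter_filter]
    simp [Bool.and_comm]

theorem pv_mem_assoc_of_mem_keys {deg_sets : List (String × List String)} {n : String}
    (h : n ∈ deg_sets.map Prod.fst) :
    ∃ v, (n, v) ∈ deg_sets := by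
  rcases List.mem_map.1 h with ⟨p, hp, rfl⟩
  exact ⟨p.2, hp⟩

theorem pv_getD_eq {deg_sets : List (String × List String)} {n : String} {v : List String}
    (hnd : (deg_sets.map Prod.fst).Nodup) (h : (n, v) ∈ deg_sets) :
    (PySem.Dict.mk deg_sets).getD n [] = v := by
  exact PySem.Dict.getD_of_mem_items _ h (by simpa [PySem.Dict.keys] using hnd) []

theorem get_intersection_genes_spec_aux (deg_sets : List (String × List String))
    (selected_datasets : List String) (exclusive : Bool)
    (hpre : Pre_get_intersection_genes deg_sets selected_datasets exclusive) :
    get_intersection_genes deg_sets selected_datasets exclusive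
      = get_intersection_genes_alt deg_sets selected_datasets exclusive := by
  obtain ⟨hnd, hsel⟩ := hpre
  cases selected_datasets with
  | nil => rfl
  | cons s0 rest =>
    unfold get_intersection_genes get_intersection_genes_alt
    simp only [List.isEmpty_cons, if_neg, Bool.false_eq_true, not_false_iff, List.headD_cons,
      List.map_cons]
    have hs0 : s0 ∈ deg_sets.map Prod.fst := hsel s0 (by simp)
    cases exclusive with
    | false =>
      simp only [if_neg, Bool.false_eq_true, not_false_iff, PySem.Set.inter]
      rw [pv_foldl_filter (fun (t : PySem.Set String) x => PySem.Set.contains t x)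
          (rest.map (fun name => (PySem.Dict.mk deg_sets).getD name []))]
      apply List.filter_congr
      intro g hg
      have hg0 : g ∈ (PySem.Dict.mk deg_sets).getD s0 [] := by
        simpa [PySem.Set.mem_ofList] using hg
      rw [Bool.eq_iff_iff]
      simp only [List.all_map, List.all_eq_true, Function.comp, Bool.or_eq_true,
        List.contains_iff_mem]
      constructor
      · intro hall p hp
        by_cases hmem : PySem.Set.contains (PySem.Set.ofList (s0 :: rest)) p.1 = true
        · right
          have hp1 : p.1 ∈ s0 :: rest := by
            simpa [PySem.Set.contains_iff, PySem.Set.mem_ofList] using hmem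
          have hv : (PySem.Dict.mk deg_sets).getD p.1 [] = p.2 := pv_getD_eq hnd hp
          rcases List.mem_cons.1 hp1 with h0 | hr
          · subst h0; rw [hv] at hg0; simpa [List.contains_iff_mem] using hg0
          · have := hall p.1 hr; rw [hv] at this
            simpa [List.contains_iff_mem] using this
        · left; simpa using hmem
      · intro hall n hn
        have hnk : n ∈ deg_sets.map Prod.fst := hsel n (by simp [hn])
        rcases pv_mem_assoc_of_mem_keys hnk with ⟨v, hv⟩
        rw [pv_getD_eq hnd hv]
        rcases hall (n, v) hv with hbad | hok
        · exfalso
          have hc : ((PySem.Set.ofList (s0 :: rest)).contains n) = true := by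
            simpa [PySem.Set.mem_ofList] using List.mem_cons_of_mem s0 hn
          rw [hc] at hbad
          simp at hbad
        · simpa [List.contains_iff_mem] using hok
    | true =>
      simp only [if_pos, PySem.Set.inter, PySem.Set.diff]
      rw [pv_foldl_filter (fun (t : PySem.Set String) x => PySem.Set.contains t x)
            (rest.map (fun name => (PySem.Dict.mk deg_sets).getD name [])),
          pv_foldl_filter
            (fun (name : String) x => !PySem.Set.contains ((PySem.Dict.mk deg_sets).getD name []) x),
          List.filter_filter]
      apply List.filter_congr
      intro g hg
      have hg0 : g ∈ (PySem.Dict.mk deg_sets).getD s0 [] := by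
        simpa [PySem.Set.mem_ofList] using hg
      rw [Bool.eq_iff_iff]
      simp only [List.all_map, List.all_eq_true, List.mem_filter, Function.comp,
        Bool.and_eq_true, PySem.Dict.keys_mk]
      constructor
      · intro ⟨hothers, hsel'⟩ p hp
        have hv : (PySem.Dict.mk deg_sets).getD p.1 [] = p.2 := pv_getD_eq hnd hp
        by_cases hmem : p.1 ∈ s0 :: rest
        · have h1 : PySem.Set.contains (PySem.Set.ofList (s0 :: rest)) p.1 = true := by
            simp [PySem.Set.mem_ofList, hmem]
          rw [h1]
          rcases List.mem_cons.1 hmem with h0 | hr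
          · subst h0; rw [hv] at hg0
            simpa [List.contains_iff_mem] using hg0
          · have := hsel' p.1 hr; rw [hv] at this
            simpa [List.contains_iff_mem] using this
        · have h1 : PySem.Set.contains (PySem.Set.ofList (s0 :: rest)) p.1 = false := by
            simp [PySem.Set.mem_ofList]
            simpa using hmem
          rw [h1]
          have hfk : p.1 ∈ List.map (fun x => x.1) deg_sets := List.mem_map.2 ⟨p, hp, rfl⟩
          have := hothers p.1 ⟨hfk, by simpa [List.contains_iff_mem] using hmem⟩
          rw [hv] at this
          simpa [PySem.Set.contains, List.contains_iff_mem] using this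
      · intro hall
        constructor
        · intro n hnk
          have hnk' : n ∈ deg_sets.map Prod.fst := by simpa using hnk.1
          have hnn : n ∉ s0 :: rest := by simpa [List.contains_iff_mem] using hnk.2
          rcases pv_mem_assoc_of_mem_keys hnk' with ⟨v, hv⟩
          rw [pv_getD_eq hnd hv]
          have := hall (n, v) hv
          have h0 : PySem.Set.contains (PySem.Set.ofList (s0 :: rest)) n = false := by
            simpa [PySem.Set.mem_ofList] using hnn
          rw [h0] at this
          simpa [PySem.Set.contains, List.contains_iff_mem] using this.symm
        · intro n hn
          have hnk : n ∈ deg_sets.map Prod.fst := hsel n (by simp [hn])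
          rcases pv_mem_assoc_of_mem_keys hnk with ⟨v, hv⟩
          rw [pv_getD_eq hnd hv]
          have := hall (n, v) hv
          have h1 : PySem.Set.contains (PySem.Set.ofList (s0 :: rest)) n = true := by
            simp [PySem.Set.mem_ofList, List.mem_cons_of_mem _ hn]
          rw [h1] at this
          simpa [List.contains_iff_mem] using this.symm

-- ===== VERDICT (by name: the statement is the Claim_ definition above) =====
theorem get_intersection_genes_spec : Claim_equal_get_intersection_genes := by
  intro deg_sets selected_datasets exclusive _ hpre
  exact get_intersection_genes_spec_aux deg_sets selected_datasets exclusive hpre
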